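-- pv_equiv track=rewrite | github.com/mschmidlin1/MSDS_comp4581_files | Week4/schmidlin_lab4.py | recCPairDist
-- ===== SOURCE A (Python) =====
-- def recCPairDist(points):
--     if len(points)==2:
--         return points[1]-points[0]
--     if len(points)==3:
--         return min(points[2]-points[1], points[1]-points[0])
--
--     mid = len(points)//2
--     left = points[:mid]
--     right = points[mid:]
--
--     return min(recCPairDist(left), recCPairDist(right), points[mid]-points[mid-1])
-- ===== SOURCE B (Python) =====
-- def recCPairDist(points):
--     # Single pass over adjacent gaps instead of divide-and-conquer.
--     gaps = [b - a for a, b in zip(points, points[1:])]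
--     return min(gaps)
-- ===== Notes on version B (the rewrite author's own statement) =====
-- stated objective: faster
-- what changed: Replaces the divide-and-conquer recursion over sublist copies with a single linear pass taking the minimum of the adjacent differences.
import Mathlib
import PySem

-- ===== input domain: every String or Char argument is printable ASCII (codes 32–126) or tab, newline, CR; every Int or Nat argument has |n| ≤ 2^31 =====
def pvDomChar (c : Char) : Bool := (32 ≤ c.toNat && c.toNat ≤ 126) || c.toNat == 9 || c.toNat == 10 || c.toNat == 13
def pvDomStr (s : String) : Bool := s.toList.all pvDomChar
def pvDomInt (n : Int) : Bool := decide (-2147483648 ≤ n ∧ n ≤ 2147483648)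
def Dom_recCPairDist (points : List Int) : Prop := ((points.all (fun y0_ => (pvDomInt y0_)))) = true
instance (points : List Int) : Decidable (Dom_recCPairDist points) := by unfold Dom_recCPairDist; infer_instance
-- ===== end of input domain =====

-- B replaces A's divide-and-conquer with a single pass over adjacent gaps (return value identical on len >= 2).
-- ===== PORT A =====
def recCPairDist (points : List Int) : Int :=
  -- totality guard: on length < 2 the Python recurses forever (RecursionError); excluded by Pre_
  if points.length < 2 then 0
  else if points.length = 2 then points.getD 1 0 - points.getD 0 0
  else if points.length = 3 then
    min (points.getD 2 0 - points.getD 1 0) (points.getD 1 0 - points.getD 0 0)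
  else
    let mid := points.length / 2
    min (min (recCPairDist (points.take mid)) (recCPairDist (points.drop mid)))
        (points.getD mid 0 - points.getD (mid - 1) 0)
termination_by points.length
decreasing_by
  · simp [List.length_take]; omega
  · simp [List.length_drop]; omega

-- ===== PORT B =====
def recCPairDist_alt (points : List Int) : Int :=
  let gaps := (points.zip points.tail).map (fun p => p.2 - p.1)
  match PySem.List.min? gaps (fun x => x) with
  | some m => m
  | none => 0   -- Python's min([]) raises ValueError; excluded by Pre_

-- ===== PRECONDITION & SPEC =====
-- A recurses forever (RecursionError) on lists of length < 2 and B's min over an empty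
-- gap list raises ValueError there, so Pre_ admits exactly the lengths on which A returns.
def Pre_recCPairDist (points : List Int) : Prop := 2 <= points.length
instance (points : List Int) : Decidable (Pre_recCPairDist points) := by unfold Pre_recCPairDist; infer_instance
def pvWitness_recCPairDist : List Int := [1, 4, 9, 11]
def Spec_recCPairDist (points : List Int) (out : Int) : Prop := out = recCPairDist_alt points
instance (points : List Int) (out : Int) : Decidable (Spec_recCPairDist points out) := by unfold Spec_recCPairDist; infer_instance

-- ===== CLAIM (what is proved, stated in full; the proofs are below) =====
def Claim_equal_recCPairDist : Prop := ∀ (points : List Int), Dom_recCPairDist points → Pre_recCPairDist points → Spec_recCPairDist points (recCPairDist points)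

-- ===== LEMMAS AND PROOFS =====

/-- adjacent differences of a list -/
def pvGaps (xs : List Int) : List Int := (xs.zip xs.tail).map (fun p => p.2 - p.1)

/-- minimum of a list, 0 on empty -/
def pvMinL : List Int → Int
  | [] => 0
  | x :: t => t.foldl min x

theorem pvGaps_cons2 (a b : Int) (t : List Int) :
    pvGaps (a :: b :: t) = (b - a) :: pvGaps (b :: t) := by
  simp [pvGaps]

theorem pvGaps_append (xs ys : List Int) (hx : xs ≠ []) (hy : ys ≠ []) :
    pvGaps (xs ++ ys) = pvGaps xs ++ (ys.headD 0 - xs.getLastD 0) :: pvGaps ys := by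
  induction xs with
  | nil => exact absurd rfl hx
  | cons a t ih =>
    cases t with
    | nil =>
      cases ys with
      | nil => exact absurd rfl hy
      | cons y s => simp [pvGaps]
    | cons b u =>
      have := ih (by simp)
      simp only [List.cons_append] at *
      rw [pvGaps_cons2, this, pvGaps_cons2]
      simp

theorem pvFoldl_min_assoc (s : List Int) (a b : Int) :
    s.foldl min (min a b) = min a (s.foldl min b) := by
  induction s generalizing b with
  | nil => simp
  | cons c t ih => simp only [List.foldl_cons, min_assoc, ih]

theorem pvMinL_append (l1 l2 : List Int) (h1 : l1 ≠ []) (h2 : l2 ≠ []) :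
    pvMinL (l1 ++ l2) = min (pvMinL l1) (pvMinL l2) := by
  cases l1 with
  | nil => exact absurd rfl h1
  | cons x t =>
    cases l2 with
    | nil => exact absurd rfl h2
    | cons y s =>
      simp only [pvMinL, List.cons_append, List.foldl_cons, List.foldl_append,
        pvFoldl_min_assoc]

theorem pvGaps_length (xs : List Int) : (pvGaps xs).length = xs.length - 1 := by
  simp [pvGaps, List.length_zip, List.length_tail]

theorem pvGaps_ne_nil (xs : List Int) (h : 2 ≤ xs.length) : pvGaps xs ≠ [] := by
  have := pvGaps_length xs
  intro hn; rw [hn] at this; simp at this; omega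

theorem recCPairDist_eq_minGaps : ∀ (n : Nat) (l : List Int), l.length = n → 2 ≤ n →
    recCPairDist l = pvMinL (pvGaps l) := by
  intro n
  induction n using Nat.strong_induction_on with
  | _ n ih =>
    intro l hl hn
    match l, hl with
    | [], hl => simp at hl; omega
    | [_], hl => simp at hl; omega
    | [a, b], hl => simp [recCPairDist, pvGaps, pvMinL]
    | [a, b, c], hl => simp [recCPairDist, pvGaps, pvMinL, min_comm]
    | a :: b :: c :: d :: u, hl =>
        rw [recCPairDist]
        set L : List Int := a :: b :: c :: d :: u with hLdef
        have h4 : 4 ≤ L.length := by simp [hLdef]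
        have hnot2 : ¬ L.length < 2 := by omega
        have hne2 : ¬ L.length = 2 := by omega
        have hne3 : ¬ L.length = 3 := by omega
        simp only [hnot2, hne2, hne3, if_false]
        set mid := L.length / 2 with hmid
        have hmid2 : 2 ≤ mid := by omega
        have hmidlt : mid < L.length := by omega
        have htl : (L.take mid).length = mid := by simp; omega
        have hdl : (L.drop mid).length = L.length - mid := by simp
        have hA1 : recCPairDist (L.take mid) = pvMinL (pvGaps (L.take mid)) := by
          apply ih mid (by omega) _ htl hmid2
        have hA2 : recCPairDist (L.drop mid) = pvMinL (pvGaps (L.drop mid)) := by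
          apply ih (L.length - mid) (by omega) _ hdl (by omega)
        rw [hA1, hA2]
        have hsplit : L = L.take mid ++ L.drop mid := (List.take_append_drop mid L).symm
        have htne : L.take mid ≠ [] := by
          intro h; rw [h] at htl; simp at htl; omega
        have hdne : L.drop mid ≠ [] := by
          intro h; rw [h] at hdl; simp at hdl; omega
        have hgaps : pvGaps L = pvGaps (L.take mid) ++
            ((L.drop mid).headD 0 - (L.take mid).getLastD 0) :: pvGaps (L.drop mid) := by
          conv_lhs => rw [hsplit]
          exact pvGaps_append _ _ htne hdne
        have hhead : (L.drop mid).headD 0 = L.getD mid 0 := by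
          rw [List.headD_eq_head?_getD, List.head?_drop, List.getD]
        have hlast : (L.take mid).getLastD 0 = L.getD (mid - 1) 0 := by
          rw [List.getLastD_eq_getLast?, List.getLast?_eq_getElem?, htl,
            List.getElem?_take_of_lt (by omega)]
          simp [List.getD]
        rw [hgaps, pvMinL_append _ _ (pvGaps_ne_nil _ (by omega)) (by simp)]
        have hcons : pvMinL (((L.drop mid).headD 0 - (L.take mid).getLastD 0) :: pvGaps (L.drop mid))
            = min ((L.drop mid).headD 0 - (L.take mid).getLastD 0) (pvMinL (pvGaps (L.drop mid))) := by
          have : ((L.drop mid).headD 0 - (L.take mid).getLastD 0) :: pvGaps (L.drop mid)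
              = [(L.drop mid).headD 0 - (L.take mid).getLastD 0] ++ pvGaps (L.drop mid) := by simp
          rw [this, pvMinL_append _ _ (by simp) (pvGaps_ne_nil _ (by omega))]
          rfl
        rw [hcons, hhead, hlast]
        omega

theorem recCPairDist_alt_eq_minGaps (l : List Int) (h : 2 ≤ l.length) :
    recCPairDist_alt l = pvMinL (pvGaps l) := by
  have hne := pvGaps_ne_nil l h
  show (match PySem.List.min? (pvGaps l) (fun x => x) with
    | some m => m | none => 0) = pvMinL (pvGaps l)
  cases hg : pvGaps l with
  | nil => exact absurd hg hne
  | cons x t => rw [PySem.List.min?_id_cons]; rfl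

-- ===== VERDICT (by name: the statement is the Claim_ definition above) =====
theorem recCPairDist_spec : Claim_equal_recCPairDist := by
  intro points _ hpre
  unfold Spec_recCPairDist
  rw [recCPairDist_eq_minGaps points.length points rfl hpre,
    recCPairDist_alt_eq_minGaps points hpre]
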